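-- pv_equiv track=rewrite | github.com/reejungkim/Codility | 5-4 PassingCars.py | solution
-- ===== SOURCE A (Python) =====
-- def solution(A):
--     # write your code in Python 3.6
--     arr_0 = []
--     arr_1 = []
--
--     for i in range(0, len(A)) :
--         if A[i] == 0:
--             arr_0.append(i)
--         else:
--             arr_1.append(i)
--
--
--
--     count = 0
--
--     for x in arr_0:
--         for y in arr_1:
--             if x < y:
--                 count +=1
--
--     if count > 1000000000:
--         solution = -1
--     else:
--         solution = count
--
--     return solution
--
--
-- #    return -1
--
--
--     pass
-- ===== SOURCE B (Python) =====
-- def solution(A):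
--     zeros = 0
--     count = 0
--     for a in A:
--         if a == 0:
--             zeros += 1
--         else:
--             count += zeros
--     return -1 if count > 1000000000 else count
-- ===== Notes on version B (the rewrite author's own statement) =====
-- stated objective: simpler
-- what changed: Replaced the explicit index-partition lists plus a nested pair-counting loop by a single pass that keeps a running zero-count and adds it at each nonzero element.
import Mathlib
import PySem

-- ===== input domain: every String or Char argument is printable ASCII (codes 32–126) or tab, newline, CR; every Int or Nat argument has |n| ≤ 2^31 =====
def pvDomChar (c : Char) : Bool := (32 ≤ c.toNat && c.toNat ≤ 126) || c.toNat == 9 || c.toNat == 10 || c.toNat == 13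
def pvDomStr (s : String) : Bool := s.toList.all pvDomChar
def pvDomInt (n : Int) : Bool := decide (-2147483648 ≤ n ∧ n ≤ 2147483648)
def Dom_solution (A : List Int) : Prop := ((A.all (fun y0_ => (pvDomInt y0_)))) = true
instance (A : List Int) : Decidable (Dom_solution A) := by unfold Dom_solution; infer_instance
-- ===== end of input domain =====

-- B replaces A's index-partition lists and nested pair-counting loop by one pass with a
-- running zero-count added at each nonzero element (simpler; same cap on the count).

-- ===== PORT A =====
-- literal transliteration of A: partition the indices into arr_0/arr_1, then a nested
-- loop counting pairs x < y; A[i] is always in range here, so pyGetD's default is never used.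
def solution (A : List Int) : Int :=
  let p := (PySem.List.pyRange 0 (A.length : Int) 1).foldl
    (fun (acc : List Int × List Int) i =>
      if PySem.List.pyGetD A i 0 = 0 then (acc.1 ++ [i], acc.2)
      else (acc.1, acc.2 ++ [i])) ([], [])
  let count := p.1.foldl (fun c x => p.2.foldl (fun c y => if x < y then c + 1 else c) c) (0 : Int)
  if count > 1000000000 then (-1 : Int) else count

-- ===== PORT B =====
def solution_alt (A : List Int) : Int :=
  let s := A.foldl (fun (zc : Int × Int) a =>
      if a = 0 then (zc.1 + 1, zc.2) else (zc.1, zc.2 + zc.1)) ((0 : Int), (0 : Int))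
  if s.2 > 1000000000 then (-1 : Int) else s.2

-- ===== PRECONDITION & SPEC =====
def Spec_solution (A : List Int) (out : Int) : Prop := out = solution_alt A
instance (A : List Int) (out : Int) : Decidable (Spec_solution A out) := by unfold Spec_solution; infer_instance

-- ===== CLAIM (what is proved, stated in full; the proofs are below) =====
def Claim_equal_solution : Prop := ∀ (A : List Int), Dom_solution A → Spec_solution A (solution A)

-- ===== LEMMAS AND PROOFS =====

-- A's partition fold, named for the proofs.
def pvPart (A : List Int) : List Int × List Int :=
  (PySem.List.pyRange 0 (A.length : Int) 1).foldl
    (fun (acc : List Int × List Int) i =>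
      if PySem.List.pyGetD A i 0 = 0 then (acc.1 ++ [i], acc.2)
      else (acc.1, acc.2 ++ [i])) ([], [])

-- B's fold, named for the proofs.
def pvBF (A : List Int) : Int × Int :=
  A.foldl (fun (zc : Int × Int) a =>
      if a = 0 then (zc.1 + 1, zc.2) else (zc.1, zc.2 + zc.1)) ((0 : Int), (0 : Int))

lemma pvInner (l : List Int) (x c : Int) :
    l.foldl (fun c y => if x < y then c + 1 else c) c
      = c + (l.countP (fun y => x < y) : Int) := by
  induction l generalizing c with
  | nil => simp
  | cons h t ih =>
    simp only [List.foldl_cons, List.countP_cons]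
    by_cases hx : x < h
    · simp only [hx, decide_true, if_pos, ih]
      push_cast
      ring
    · simp [hx, ih]

lemma pvOuter (l0 l1 : List Int) (c : Int) :
    l0.foldl (fun c x => l1.foldl (fun c y => if x < y then c + 1 else c) c) c
      = c + (l0.map (fun x => (l1.countP (fun y => x < y) : Int))).sum := by
  have hfun : (fun (c x : Int) => l1.foldl (fun c y => if x < y then c + 1 else c) c)
      = fun (c x : Int) => c + (l1.countP (fun y => x < y) : Int) := by
    funext c x
    exact pvInner l1 x c
  rw [hfun, PySem.List.foldl_add]

lemma pvPart_append (A : List Int) (a : Int) :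
    pvPart (A ++ [a]) =
      if a = 0 then ((pvPart A).1 ++ [(A.length : Int)], (pvPart A).2)
      else ((pvPart A).1, (pvPart A).2 ++ [(A.length : Int)]) := by
  unfold pvPart
  have hlen : (((A ++ [a]).length : Nat) : Int) = (A.length : Int) + 1 := by
    simp
  rw [hlen, PySem.List.pyRange_one_succ_right (by positivity), List.foldl_append]
  have hcongr :
      (PySem.List.pyRange 0 (A.length : Int) 1).foldl
        (fun (acc : List Int × List Int) i =>
          if PySem.List.pyGetD (A ++ [a]) i 0 = 0 then (acc.1 ++ [i], acc.2)
          else (acc.1, acc.2 ++ [i])) ([], [])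
      = (PySem.List.pyRange 0 (A.length : Int) 1).foldl
        (fun (acc : List Int × List Int) i =>
          if PySem.List.pyGetD A i 0 = 0 then (acc.1 ++ [i], acc.2)
          else (acc.1, acc.2 ++ [i])) ([], []) := by
    apply PySem.List.foldl_congr_mem
    intro acc i hi
    have hmem := (PySem.List.mem_pyRange_one).mp hi
    have hget : PySem.List.pyGetD (A ++ [a]) i 0 = PySem.List.pyGetD A i 0 := by
      rw [PySem.List.pyGetD_eq_getElem _ 0 (by omega) (by simp; omega),
          PySem.List.pyGetD_eq_getElem _ 0 (by omega) (by omega)]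
      exact List.getElem_append_left (by omega)
    rw [hget]
  rw [hcongr]
  have hlast : PySem.List.pyGetD (A ++ [a]) (A.length : Int) 0 = a := by
    rw [PySem.List.pyGetD_natCast]
    simp [List.getD]
  simp only [List.foldl_cons, List.foldl_nil, hlast]

lemma pvBF_append (A : List Int) (a : Int) :
    pvBF (A ++ [a]) =
      if a = 0 then ((pvBF A).1 + 1, (pvBF A).2)
      else ((pvBF A).1, (pvBF A).2 + (pvBF A).1) := by
  unfold pvBF
  rw [List.foldl_append]
  simp

-- the combined loop invariant, by reverse induction on the list
lemma pvMain (A : List Int) :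
    (∀ x ∈ (pvPart A).1, x < (A.length : Int)) ∧
    (∀ y ∈ (pvPart A).2, y < (A.length : Int)) ∧
    (((pvPart A).1.length : Int) = (pvBF A).1) ∧
    (((pvPart A).1.map (fun x => ((pvPart A).2.countP (fun y => x < y) : Int))).sum
        = (pvBF A).2) := by
  induction A using List.reverseRecOn with
  | nil =>
    refine ⟨?_, ?_, ?_, ?_⟩ <;>
      simp [pvPart, pvBF, PySem.List.pyRange_one_eq_nil le_rfl]
  | append_singleton A a ih =>
    obtain ⟨h0, h1, hz, hc⟩ := ih
    have hpart := pvPart_append A a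
    have hbf := pvBF_append A a
    have hlen : (((A ++ [a]).length : Nat) : Int) = (A.length : Int) + 1 := by simp
    by_cases ha : a = 0
    · rw [if_pos ha] at hpart hbf
      refine ⟨?_, ?_, ?_, ?_⟩
      · intro x hx
        rw [hpart] at hx
        rw [hlen]
        rcases List.mem_append.mp hx with h | h
        · exact lt_trans (h0 x h) (by omega)
        · simp at h
          omega
      · intro y hy
        rw [hpart] at hy
        rw [hlen]
        exact lt_trans (h1 y hy) (by omega)
      · rw [hpart, hbf]
        simp [← hz]
      · rw [hpart, hbf]
        simp only [List.map_append, List.sum_append, List.map_cons, List.map_nil,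
          List.sum_cons, List.sum_nil]
        have hzero : (pvPart A).2.countP (fun y => (A.length : Int) < y) = 0 := by
          apply List.countP_eq_zero.mpr
          intro y hy
          simp only [decide_eq_true_eq]
          exact not_lt.mpr (le_of_lt (h1 y hy))
        rw [hzero, hc]
        simp
    · rw [if_neg ha] at hpart hbf
      refine ⟨?_, ?_, ?_, ?_⟩
      · intro x hx
        rw [hpart] at hx
        rw [hlen]
        exact lt_trans (h0 x hx) (by omega)
      · intro y hy
        rw [hpart] at hy
        rw [hlen]
        rcases List.mem_append.mp hy with h | h
        · exact lt_trans (h1 y h) (by omega)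
        · simp at h
          omega
      · rw [hpart, hbf]
        simpa using hz
      · rw [hpart, hbf]
        have hmap : ((pvPart A).1.map
            (fun x => (((pvPart A).2 ++ [(A.length : Int)]).countP (fun y => x < y) : Int)))
            = ((pvPart A).1.map
              (fun x => ((pvPart A).2.countP (fun y => x < y) : Int) + 1)) := by
          apply List.map_congr_left
          intro x hx
          rw [List.countP_append]
          have hone : ([((A.length : Int))].countP (fun y => x < y)) = 1 := by
            simp [h0 x hx]
          rw [hone]
          push_cast
          ring
        rw [hmap, PySem.List.sum_map_add_int, PySem.List.sum_map_const_int, hc, mul_one, hz]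

-- ===== VERDICT (by name: the statement is the Claim_ definition above) =====
theorem solution_spec : Claim_equal_solution := by
  intro A _
  unfold Spec_solution
  have hA : solution A =
      if ((pvPart A).1.foldl
            (fun c x => (pvPart A).2.foldl (fun c y => if x < y then c + 1 else c) c) (0 : Int))
          > 1000000000 then (-1 : Int)
      else ((pvPart A).1.foldl
            (fun c x => (pvPart A).2.foldl (fun c y => if x < y then c + 1 else c) c) (0 : Int)) := rfl
  have hB : solution_alt A =
      if (pvBF A).2 > 1000000000 then (-1 : Int) else (pvBF A).2 := rfl
  have h := (pvMain A).2.2.2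
  rw [hA, hB, pvOuter, zero_add, h]
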